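-- pv_equiv track=rewrite | github.com/nverno/wat-ts-mode | script/keywords.py | fill_lines
-- ===== SOURCE A (Python) =====
-- def fill_lines(lst, max_len=85):
--     res, cur = [], ""
--     for e in lst:
--         if len(cur) + len(e) + 3 > max_len:
--             res.append(cur)
--             cur = ""
--         cur += f" '{e}'"
--     res.append(cur)
--     return res
-- ===== SOURCE B (Python) =====
-- def fill_lines(lst, max_len=85):
--     # Line-at-a-time greedy: each line after the first starts with one forced
--     # element, then extends with the longest run of elements that still fits.
--     def fit(n, i):
--         # index just past the longest run lst[i:] whose rendered widths fit after n
--         while i < len(lst) and n + len(lst[i]) + 3 <= max_len: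
--             n += len(lst[i]) + 3
--             i += 1
--         return i
--
--     def render(chunk):
--         return "".join(f" '{e}'" for e in chunk)
--
--     j = fit(0, 0)
--     lines = [render(lst[:j])]
--     i = j
--     while i < len(lst):
--         j = fit(len(lst[i]) + 3, i + 1)
--         lines.append(render(lst[i:j]))
--         i = j
--     return lines
-- ===== Notes on version B (the rewrite author's own statement) =====
-- stated objective: alternative
-- what changed: B replaces A's element-at-a-time loop with an overflow-flush on a growing string accumulator by a line-at-a-time greedy: an outer loop that, per line, takes one forced element plus the longest following run that still fits (computed by an index-advancing fit scan) and renders each slice at once.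
import Mathlib
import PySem

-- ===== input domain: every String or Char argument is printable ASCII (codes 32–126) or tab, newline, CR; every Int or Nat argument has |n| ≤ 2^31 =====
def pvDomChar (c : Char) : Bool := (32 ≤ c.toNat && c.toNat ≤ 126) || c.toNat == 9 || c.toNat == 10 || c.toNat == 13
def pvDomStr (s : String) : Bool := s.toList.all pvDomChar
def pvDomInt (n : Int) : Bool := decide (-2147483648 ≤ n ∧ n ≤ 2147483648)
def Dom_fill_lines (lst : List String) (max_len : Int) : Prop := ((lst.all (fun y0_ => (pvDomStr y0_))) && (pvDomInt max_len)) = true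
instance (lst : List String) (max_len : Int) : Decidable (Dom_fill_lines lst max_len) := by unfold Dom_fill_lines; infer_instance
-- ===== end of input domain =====

-- B is an alternative decomposition of A (line-at-a-time greedy slicing instead of an
-- element loop with an overflow flush); same output, similar cost.
-- Strings are carried as List Char inside both ports (exact: Python len/+= on str = length/append on code points).

-- ===== PORT A =====
-- f" '{e}'" as a char list
def pvWrap (e : String) : List Char := ' ' :: '\'' :: (e.toList ++ ['\''])

-- the body of A's for-loop: state (res, cur)
def pvStepA (max_len : Int) (st : List (List Char) × List Char) (e : String) :
    List (List Char) × List Char :=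
  let (res, cur) := st
  let (res, cur) :=
    if ((cur.length : Int) + (e.toList.length : Int) + 3 > max_len) then (res ++ [cur], [])
    else (res, cur)
  (res, cur ++ pvWrap e)

def fill_lines (lst : List String) (max_len : Int) : List String :=
  let (res, cur) := lst.foldl (pvStepA max_len) ([], [])
  (res ++ [cur]).map String.mk

-- ===== PORT B =====
-- "".join(f" '{e}'" for e in chunk)
def pvRender (g : List String) : List Char := (g.map pvWrap).flatten

-- B's fit scan: index-based while loop over lst, ported as the structural
-- recursion on the suffix being scanned; returns how many elements it consumed
-- (the Python index is the start position plus this count).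
def pvFit (max_len : Int) (n : Int) (items : List String) : Nat :=
  match items with
  | [] => 0
  | e :: rest =>
      if n + (e.toList.length : Int) + 3 ≤ max_len then
        pvFit max_len (n + (e.toList.length : Int) + 3) rest + 1
      else 0

-- B's outer while loop: one forced element, then the longest fitting run.
def pvLines (max_len : Int) : List String → List (List Char)
  | [] => []
  | e :: rest =>
      let k := pvFit max_len ((e.toList.length : Int) + 3) rest
      pvRender (e :: rest.take k) :: pvLines max_len (rest.drop k)
termination_by items => items.length
decreasing_by
  simp only [List.length_drop, List.length_cons]
  omega

def fill_lines_alt (lst : List String) (max_len : Int) : List String :=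
  let j := pvFit max_len 0 lst
  (pvRender (lst.take j) :: pvLines max_len (lst.drop j)).map String.mk

-- ===== PRECONDITION & SPEC =====
def Spec_fill_lines (lst : List String) (max_len : Int) (out : List String) : Prop := out = fill_lines_alt lst max_len
instance (lst : List String) (max_len : Int) (out : List String) : Decidable (Spec_fill_lines lst max_len out) := by unfold Spec_fill_lines; infer_instance

-- ===== CLAIM (what is proved, stated in full; the proofs are below) =====
def Claim_equal_fill_lines : Prop := ∀ (lst : List String) (max_len : Int), Dom_fill_lines lst max_len → Spec_fill_lines lst max_len (fill_lines lst max_len)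

-- ===== LEMMAS AND PROOFS =====

theorem pvWrap_length_int (e : String) :
    ((pvWrap e).length : Int) = (e.toList.length : Int) + 3 := by
  simp [pvWrap]; ring

theorem append_wrap_length (cur : List Char) (e : String) :
    (((cur ++ pvWrap e).length : Int)) = (cur.length : Int) + (e.toList.length : Int) + 3 := by
  simp [pvWrap]; ring

-- invariant: running A's loop from state (res, cur) and then appending the final cur
-- yields exactly the line-at-a-time decomposition B computes.
theorem pv_loop (m : Int) (items : List String) :
    ∀ (res : List (List Char)) (cur : List Char),
      (List.foldl (pvStepA m) (res, cur) items).1 ++ [(List.foldl (pvStepA m) (res, cur) items).2]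
        = res ++ (cur ++ pvRender (items.take (pvFit m (cur.length : Int) items)))
            :: pvLines m (items.drop (pvFit m (cur.length : Int) items)) := by
  induction items with
  | nil => intro res cur; simp [pvFit, pvRender, pvLines]
  | cons e rest ih =>
      intro res cur
      by_cases h : (cur.length : Int) + (e.toList.length : Int) + 3 ≤ m
      · -- e fits on the current line
        have hstep : pvStepA m (res, cur) e = (res, cur ++ pvWrap e) := by
          simp only [pvStepA]; rw [if_neg (not_lt.mpr h)]
        have hk : pvFit m (cur.length : Int) (e :: rest)
            = pvFit m ((cur.length : Int) + (e.toList.length : Int) + 3) rest + 1 := by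
          simp only [pvFit]; rw [if_pos h]
        rw [List.foldl_cons, hstep, ih]
        rw [hk]
        have hlen : (((cur ++ pvWrap e).length : Int))
            = (cur.length : Int) + (e.toList.length : Int) + 3 := append_wrap_length cur e
        rw [hlen]
        simp [pvRender, List.append_assoc]
      · -- overflow: A flushes cur, B closes the line here
        have hstep : pvStepA m (res, cur) e = (res ++ [cur], pvWrap e) := by
          simp only [pvStepA]; rw [if_pos (lt_of_not_ge h)]; rfl
        have hk : pvFit m (cur.length : Int) (e :: rest) = 0 := by
          simp only [pvFit]; rw [if_neg h]
        rw [List.foldl_cons, hstep, ih]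
        rw [hk]
        have hwl : (((pvWrap e).length : Int)) = (e.toList.length : Int) + 3 :=
          pvWrap_length_int e
        rw [hwl]
        simp only [List.take_zero, List.drop_zero]
        rw [pvLines]
        simp [pvRender]

-- ===== VERDICT (by name: the statement is the Claim_ definition above) =====
theorem fill_lines_spec : Claim_equal_fill_lines := by
  intro lst max_len _
  unfold Spec_fill_lines fill_lines fill_lines_alt
  have h := pv_loop max_len lst [] []
  simp only [List.length_nil, Nat.cast_zero, List.nil_append, List.nil_append] at h
  cases hfold : List.foldl (pvStepA max_len) (([], []) : List (List Char) × List Char) lst with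
  | mk r c =>
      rw [hfold] at h
      simp only at h
      show List.map String.mk (r ++ [c])
        = List.map String.mk (pvRender (List.take (pvFit max_len 0 lst) lst)
            :: pvLines max_len (List.drop (pvFit max_len 0 lst) lst))
      rw [h]
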